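-- pv_equiv track=rewrite | github.com/jayakrishsriram/hackerrank-30-days-of-code | hackerrank day 29.py | bitwiseAnd
-- ===== SOURCE A (Python) =====
-- def bitwiseAnd(n, k):
--     # Write your code here
--     maximum=0
--     for i in range(1,n+1):
--         for j in range(1,i):
--             h=i & j
--             if maximum<h< k:
--                 maximum=h
--             if maximum==k-1:
--                 return maximum
--     return maximum
-- ===== SOURCE B (Python) =====
-- def bitwiseAnd(n, k):
--     # O(1) closed form: a value v>=1 appears as a pairwise AND of two distinct
--     # numbers in 1..n iff v | (v+1) <= n (take the pair (v, v | (v+1))).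
--     if n < 2 or k <= 1:
--         return 0
--     m = n - 1 if n % 2 == 1 else n - 2   # largest achievable pairwise AND
--     c = k - 1
--     if c >= m:
--         return m
--     if c % 2 == 0 or (c | (c + 1)) <= n:
--         return c
--     return c - 1
-- ===== Notes on version B (the rewrite author's own statement) =====
-- stated objective: faster
-- what changed: Replaced A's O(n^2) scan of all pairs (i,j) with an O(1) closed form based on the fact that v>=1 occurs as a pairwise AND of distinct numbers in 1..n iff v|(v+1) <= n.
import Mathlib
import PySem

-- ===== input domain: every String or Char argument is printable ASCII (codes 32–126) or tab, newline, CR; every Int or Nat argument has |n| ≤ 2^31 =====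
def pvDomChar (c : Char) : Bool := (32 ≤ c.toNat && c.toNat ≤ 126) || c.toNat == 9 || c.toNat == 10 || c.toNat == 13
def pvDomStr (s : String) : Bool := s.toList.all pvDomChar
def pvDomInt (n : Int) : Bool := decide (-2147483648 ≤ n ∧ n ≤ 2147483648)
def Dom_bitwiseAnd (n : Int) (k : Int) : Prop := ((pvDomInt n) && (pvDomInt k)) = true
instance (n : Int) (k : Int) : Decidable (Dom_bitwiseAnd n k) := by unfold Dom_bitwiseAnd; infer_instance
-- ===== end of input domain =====

-- B replaces A's O(n^2) double loop over all pairs with an O(1) closed form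
-- based on: v ≥ 1 is a pairwise AND of two distinct numbers in 1..n iff v|(v+1) ≤ n.

-- ===== PORT A =====
-- inner `for j in range(1, i)` loop body; `.error` encodes the early `return maximum`
def bitwiseAndStep (k i : Int) (st : Except Int Int) (j : Int) : Except Int Int :=
  match st with
  | .error r => .error r
  | .ok m =>
    let h := PySem.Int.band i j
    let m' := if m < h ∧ h < k then h else m
    if m' = k - 1 then .error m' else .ok m'

def bitwiseAnd (n : Int) (k : Int) : Int :=
  match (PySem.List.pyRange 1 (n+1) 1).foldl
      (fun st i => (PySem.List.pyRange 1 i 1).foldl (bitwiseAndStep k i) st)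
      (.ok 0) with
  | .ok m => m
  | .error m => m

-- ===== PORT B =====
def bitwiseAnd_alt (n : Int) (k : Int) : Int :=
  if n < 2 ∨ k ≤ 1 then 0
  else
    let m := if PySem.Int.mod n 2 = 1 then n - 1 else n - 2
    let c := k - 1
    if c ≥ m then m
    else if PySem.Int.mod c 2 = 0 ∨ PySem.Int.bor c (c + 1) ≤ n then c
    else c - 1

-- ===== PRECONDITION & SPEC =====
def Spec_bitwiseAnd (n : Int) (k : Int) (out : Int) : Prop := out = bitwiseAnd_alt n k
instance (n : Int) (k : Int) (out : Int) : Decidable (Spec_bitwiseAnd n k out) := by unfold Spec_bitwiseAnd; infer_instance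

-- ===== CLAIM (what is proved, stated in full; the proofs are below) =====
def Claim_equal_bitwiseAnd : Prop := ∀ (n : Int) (k : Int), Dom_bitwiseAnd n k → Spec_bitwiseAnd n k (bitwiseAnd n k)

-- ===== LEMMAS AND PROOFS =====

-- ---- Nat bit lemmas ----
lemma lor_odd_even (b c : Nat) : (2*b+1) ||| (2*c) = 2*(b ||| c) + 1 := by
  have := Nat.lor_bit true b false c
  simpa [Nat.bit] using this

lemma land_odd_odd (b c : Nat) : (2*b+1) &&& (2*c+1) = 2*(b &&& c) + 1 := by
  have := Nat.land_bit true b true c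
  simpa [Nat.bit] using this

lemma land_odd_even (b c : Nat) : (2*b+1) &&& (2*c) = 2*(b &&& c) := by
  have := Nat.land_bit true b false c
  simpa [Nat.bit] using this

lemma lor_even_odd (b c : Nat) : (2*b) ||| (2*c+1) = 2*(b ||| c) + 1 := by
  have := Nat.lor_bit false b true c
  simpa [Nat.bit] using this

lemma nat_lt_lor_succ (a : Nat) : a < a ||| (a + 1) :=
  lt_of_lt_of_le (Nat.lt_succ_self a) (Nat.right_le_or)

lemma nat_and_lor (a b : Nat) : a &&& (a ||| b) = a := by
  apply Nat.eq_of_testBit_eq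
  intro i
  simp only [Nat.testBit_land, Nat.testBit_lor]
  cases a.testBit i <;> simp

lemma nat_even_lor_succ (a : Nat) (h : a % 2 = 0) : a ||| (a + 1) = a + 1 := by
  obtain ⟨b, rfl⟩ : ∃ b, a = 2 * b := ⟨a / 2, by omega⟩
  rw [lor_even_odd b b, Nat.or_self]

lemma nat_odd_lor_succ_ge (a : Nat) (h : a % 2 = 1) : a + 2 ≤ a ||| (a + 1) := by
  obtain ⟨b, rfl⟩ : ∃ b, a = 2 * b + 1 := ⟨a / 2, by omega⟩
  have h1 : 2 * b + 1 + 1 = 2 * (b + 1) := by ring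
  rw [h1, lor_odd_even b (b+1)]
  have h2 : b + 1 ≤ b ||| (b + 1) := Nat.right_le_or
  omega

-- core: a proper bit-subset a of i satisfies a ||| (a+1) ≤ i
lemma nat_lor_succ_le (a : Nat) : ∀ i : Nat, a &&& i = a → a < i → a ||| (a + 1) ≤ i := by
  induction a using Nat.strong_induction_on with
  | _ a IH =>
    intro i hand hlt
    rcases Nat.mod_two_eq_zero_or_one a with h0 | h1
    · rw [nat_even_lor_succ a h0]; omega
    · obtain ⟨b, rfl⟩ : ∃ b, a = 2 * b + 1 := ⟨a / 2, by omega⟩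
      -- i must be odd: bit 0 of a is set and a &&& i = a
      have hio : i % 2 = 1 := by
        rcases Nat.mod_two_eq_zero_or_one i with hie | hio
        · obtain ⟨c, rfl⟩ : ∃ c, i = 2 * c := ⟨i / 2, by omega⟩
          have := land_odd_even b c
          omega
        · omega
      obtain ⟨c, rfl⟩ : ∃ c, i = 2 * c + 1 := ⟨i / 2, by omega⟩
      have hb := land_odd_odd b c
      have handbc : b &&& c = b := by omega
      have hltbc : b < c := by omega
      have hIH := IH b (by omega) c handbc hltbc
      have h1 : 2 * b + 1 + 1 = 2 * (b + 1) := by ring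
      rw [h1, lor_odd_even b (b+1)]
      omega

-- ---- Int-level achievability ----
-- Ach n x : x is the AND of two distinct elements of 1..n (characterised closed-form)
def Ach (n x : Int) : Prop := (x = 0 ∧ 2 ≤ n) ∨ (1 ≤ x ∧ PySem.Int.bor x (x + 1) ≤ n)

lemma band_toNat (i j : Int) (hi : 0 ≤ i) (hj : 0 ≤ j) :
    PySem.Int.band i j = ((i.toNat &&& j.toNat : Nat) : Int) := PySem.Int.band_of_nonneg hi hj

lemma bor_succ_toNat (x : Int) (hx : 0 ≤ x) :
    PySem.Int.bor x (x + 1) = ((x.toNat ||| (x.toNat + 1) : Nat) : Int) := by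
  have := PySem.Int.bor_of_nonneg hx (by omega : (0:Int) ≤ x + 1)
  rw [this]
  congr 1
  congr 1
  omega

lemma ach_of_pair (n i j : Int) (h1 : 1 ≤ j) (h2 : j < i) (h3 : i ≤ n) :
    Ach n (PySem.Int.band i j) := by
  have hi : 0 ≤ i := by omega
  have hj : 0 ≤ j := by omega
  rw [band_toNat i j hi hj]
  set a := i.toNat &&& j.toNat with ha
  by_cases h0 : a = 0
  · left; constructor
    · simp [h0]
    · omega
  · right
    have hsub : a &&& i.toNat = a := by
      rw [ha]
      rw [Nat.land_assoc, Nat.land_comm j.toNat i.toNat, ← Nat.land_assoc, Nat.and_self]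
    have hlt : a < i.toNat := by
      have hle : a ≤ i.toNat := hsub ▸ Nat.and_le_right
      rcases Nat.lt_or_ge a i.toNat with h | h
      · exact h
      · exfalso
        have hae : a = i.toNat := by omega
        have : a ≤ j.toNat := ha ▸ Nat.and_le_right
        omega
    have hle := nat_lor_succ_le a i.toNat hsub hlt
    constructor
    · omega
    · rw [bor_succ_toNat _ (by positivity)]
      have : ((a : Int)).toNat = a := by simp
      rw [this]
      omega

lemma pair_of_ach (n x : Int) (h : Ach n x) :
    ∃ i j : Int, 1 ≤ j ∧ j < i ∧ i ≤ n ∧ x = PySem.Int.band i j := by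
  rcases h with ⟨rfl, hn⟩ | ⟨hx, hbor⟩
  · exact ⟨2, 1, by omega, by omega, hn, by decide⟩
  · refine ⟨PySem.Int.bor x (x + 1), x, hx, ?_, hbor, ?_⟩
    · rw [bor_succ_toNat x (by omega)]
      have := nat_lt_lor_succ x.toNat
      omega
    · rw [bor_succ_toNat x (by omega), band_toNat _ x (by positivity) (by omega)]
      have ht : ((x.toNat ||| (x.toNat + 1) : Nat) : Int).toNat = x.toNat ||| (x.toNat + 1) := by simp
      rw [ht, Nat.land_comm, nat_and_lor]
      omega

-- ---- the loop of A, flattened to a max-fold over all pairs ----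
def pvPairs (n : Int) : List (Int × Int) :=
  (PySem.List.pyRange 1 (n+1) 1).flatMap (fun i => (PySem.List.pyRange 1 i 1).map (fun j => (i, j)))

def pvVals (n k : Int) : List Int :=
  ((pvPairs n).map (fun p => PySem.Int.band p.1 p.2)).filter (fun h => decide (h < k))

-- once the running maximum is k-1 a plain fold never changes it
lemma plain_fixed (k : Int) (l : List (Int × Int)) :
    l.foldl (fun m p => if m < PySem.Int.band p.1 p.2 ∧ PySem.Int.band p.1 p.2 < k then PySem.Int.band p.1 p.2 else m) (k - 1) = k - 1 := by
  induction l with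
  | nil => rfl
  | cons p t ih =>
    simp only [List.foldl_cons]
    have : ¬ (k - 1 < PySem.Int.band p.1 p.2 ∧ PySem.Int.band p.1 p.2 < k) := by omega
    rw [if_neg this]
    exact ih

-- a fold from an .error state stays there
lemma err_fixed (k : Int) (t : List (Int × Int)) (r : Int) :
    t.foldl (fun st p => bitwiseAndStep k p.1 st p.2) (.error r) = .error r := by
  induction t with
  | nil => rfl
  | cons q t ih => simpa [bitwiseAndStep] using ih

-- the Except-encoded early return computes the same value as the plain fold
lemma except_eq_plain (k : Int) (l : List (Int × Int)) (m : Int) :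
    (match l.foldl (fun st p => bitwiseAndStep k p.1 st p.2) (.ok m) with
      | .ok r => r | .error r => r) =
    l.foldl (fun m p => if m < PySem.Int.band p.1 p.2 ∧ PySem.Int.band p.1 p.2 < k then PySem.Int.band p.1 p.2 else m) m := by
  induction l generalizing m with
  | nil => rfl
  | cons p t ih =>
    simp only [List.foldl_cons]
    set h := PySem.Int.band p.1 p.2 with hh
    set m' := if m < h ∧ h < k then h else m with hm'
    have hdef : bitwiseAndStep k p.1 (Except.ok m) p.2 = if m' = k - 1 then .error m' else .ok m' := rfl
    rw [hdef]
    by_cases hk : m' = k - 1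
    · rw [if_pos hk, err_fixed]
      simp only
      rw [hk, plain_fixed]
    · rw [if_neg hk]
      exact ih m'

-- the plain fold is a running max of the filtered AND values
lemma plain_eq_max (k : Int) (l : List (Int × Int)) (m : Int) :
    l.foldl (fun m p => if m < PySem.Int.band p.1 p.2 ∧ PySem.Int.band p.1 p.2 < k then PySem.Int.band p.1 p.2 else m) m =
    ((l.map (fun p => PySem.Int.band p.1 p.2)).filter (fun h => decide (h < k))).foldl max m := by
  induction l generalizing m with
  | nil => rfl
  | cons p t ih =>
    simp only [List.foldl_cons, List.map_cons, List.filter_cons]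
    by_cases hlt : PySem.Int.band p.1 p.2 < k
    · have hmax : (if m < PySem.Int.band p.1 p.2 ∧ PySem.Int.band p.1 p.2 < k then PySem.Int.band p.1 p.2 else m) = max m (PySem.Int.band p.1 p.2) := by
        by_cases hm : m < PySem.Int.band p.1 p.2
        · rw [if_pos ⟨hm, hlt⟩, max_eq_right (by omega)]
        · rw [if_neg (by tauto), max_eq_left (by omega)]
      rw [hmax, if_pos (by simp [hlt]), List.foldl_cons, ih]
    · have hid : (if m < PySem.Int.band p.1 p.2 ∧ PySem.Int.band p.1 p.2 < k then PySem.Int.band p.1 p.2 else m) = m := by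
        rw [if_neg (by tauto)]
      rw [hid, if_neg (by simp [hlt]), ih]

lemma bitwiseAnd_eq_max (n k : Int) :
    bitwiseAnd n k = (pvVals n k).foldl max 0 := by
  unfold bitwiseAnd pvVals pvPairs
  rw [show (fun st i => (PySem.List.pyRange 1 i 1).foldl (bitwiseAndStep k i) st)
        = (fun st i => ((PySem.List.pyRange 1 i 1).map (fun j => (i, j))).foldl (fun st p => bitwiseAndStep k p.1 st p.2) st)
      from funext fun st => funext fun i => by rw [List.foldl_map]]
  rw [← List.foldl_flatMap]
  rw [except_eq_plain, plain_eq_max]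

lemma mem_vals_iff (n k x : Int) :
    x ∈ pvVals n k ↔ x < k ∧ ∃ i j : Int, 1 ≤ j ∧ j < i ∧ i ≤ n ∧ x = PySem.Int.band i j := by
  unfold pvVals pvPairs
  simp only [List.mem_filter, List.mem_map, List.mem_flatMap, PySem.List.mem_pyRange_one, decide_eq_true_eq]
  constructor
  · rintro ⟨⟨p, ⟨i, ⟨hi1, hi2⟩, j, ⟨hj1, hj2⟩, rfl⟩, rfl⟩, hk⟩
    exact ⟨hk, i, j, hj1, hj2, by omega, rfl⟩
  · rintro ⟨hk, i, j, hj1, hj2, hin, rfl⟩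
    exact ⟨⟨(i, j), ⟨i, ⟨by omega, by omega⟩, j, ⟨hj1, hj2⟩, rfl⟩, rfl⟩, hk⟩

lemma mem_vals_ach (n k x : Int) :
    x ∈ pvVals n k ↔ x < k ∧ Ach n x := by
  rw [mem_vals_iff]
  constructor
  · rintro ⟨hk, i, j, h1, h2, h3, rfl⟩
    exact ⟨hk, ach_of_pair n i j h1 h2 h3⟩
  · rintro ⟨hk, h⟩
    obtain ⟨i, j, h1, h2, h3, hx⟩ := pair_of_ach n x h
    exact ⟨hk, i, j, h1, h2, h3, hx⟩

-- ---- B's closed form against Ach ----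
lemma ach_nonneg (n x : Int) (h : Ach n x) : 0 ≤ x := by
  rcases h with ⟨rfl, _⟩ | ⟨h1, _⟩ <;> omega

lemma int_mod_two (x : Int) (_hx0 : 0 ≤ x) : PySem.Int.mod x 2 = x % 2 :=
  PySem.Int.mod_eq_emod_of_pos (by omega : (0:Int) < 2)

lemma ach_le_m (n x : Int) (hn : 2 ≤ n) (h : Ach n x)
    (m : Int) (hm : m = if PySem.Int.mod n 2 = 1 then n - 1 else n - 2) : x ≤ m := by
  rw [int_mod_two n (by omega)] at hm
  rcases h with ⟨rfl, _⟩ | ⟨h1, hbor⟩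
  · split at hm <;> omega
  · have hx0 : 0 ≤ x := by omega
    have hlt : x < PySem.Int.bor x (x + 1) := by
      rw [bor_succ_toNat x hx0]
      have := nat_lt_lor_succ x.toNat
      omega
    by_cases hpar : n % 2 = 1
    · rw [if_pos hpar] at hm; omega
    · rw [if_neg hpar] at hm
      -- n even: x = n-1 would be odd, whence bor x (x+1) ≥ x+2 > n
      rcases lt_or_ge x (n - 1) with h | h
      · omega
      · exfalso
        have hxe : x = n - 1 := by omega
        have hxodd : x.toNat % 2 = 1 := by omega
        have := nat_odd_lor_succ_ge x.toNat hxodd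
        rw [bor_succ_toNat x hx0] at hbor
        omega

lemma ach_m (n : Int) (hn : 2 ≤ n)
    (m : Int) (hm : m = if PySem.Int.mod n 2 = 1 then n - 1 else n - 2) : Ach n m := by
  rw [int_mod_two n (by omega)] at hm
  by_cases hpar : n % 2 = 1
  · rw [if_pos hpar] at hm
    right
    refine ⟨by omega, ?_⟩
    rw [bor_succ_toNat m (by omega)]
    have he : m.toNat % 2 = 0 := by omega
    rw [nat_even_lor_succ m.toNat he]
    omega
  · rw [if_neg hpar] at hm
    by_cases h2 : n = 2
    · left; omega
    · right
      refine ⟨by omega, ?_⟩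
      rw [bor_succ_toNat m (by omega)]
      have he : m.toNat % 2 = 0 := by omega
      rw [nat_even_lor_succ m.toNat he]
      omega

lemma ach_even (n x : Int) (h1 : 1 ≤ x) (h2 : x % 2 = 0) (h3 : x + 1 ≤ n) : Ach n x := by
  right
  refine ⟨h1, ?_⟩
  rw [bor_succ_toNat x (by omega)]
  rw [nat_even_lor_succ x.toNat (by omega)]
  omega

-- every achievable value < k is at most B, and B itself is 0 or achievable < k
lemma alt_ub (n k x : Int) (h : Ach n x) (hk : x < k) : x ≤ bitwiseAnd_alt n k := by
  unfold bitwiseAnd_alt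
  have hx0 := ach_nonneg n x h
  by_cases hg : n < 2 ∨ k ≤ 1
  · rw [if_pos hg]
    rcases hg with hg | hg
    · rcases h with ⟨rfl, _⟩ | ⟨h1, hbor⟩
      · omega
      · exfalso
        have : x < PySem.Int.bor x (x + 1) := by
          rw [bor_succ_toNat x (by omega)]
          have := nat_lt_lor_succ x.toNat
          omega
        omega
    · omega
  · rw [if_neg hg]
    push Not at hg
    simp only
    set m := if PySem.Int.mod n 2 = 1 then n - 1 else n - 2 with hm
    have hxm := ach_le_m n x (by omega) h m hm
    split
    · omega
    · split
      · omega
      · rename_i hge hcond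
        push Not at hcond
        -- k-1 odd and bor (k-1) k > n : x ≠ k-1
        rcases lt_or_ge x (k - 1) with hlt | hge2
        · omega
        · exfalso
          have hxe : x = k - 1 := by omega
          rcases h with ⟨h0, _⟩ | ⟨h1, hbor⟩
          · have := hcond.1
            rw [int_mod_two (k-1) (by omega)] at this
            omega
          · have h2 := hcond.2
            rw [hxe] at hbor
            omega

lemma alt_mem (n k : Int) :
    bitwiseAnd_alt n k = 0 ∨ (Ach n (bitwiseAnd_alt n k) ∧ bitwiseAnd_alt n k < k) := by
  unfold bitwiseAnd_alt
  by_cases hg : n < 2 ∨ k ≤ 1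
  · rw [if_pos hg]; left; rfl
  · rw [if_neg hg]
    push Not at hg
    simp only
    set m := if PySem.Int.mod n 2 = 1 then n - 1 else n - 2 with hm
    have hmb : n - 2 ≤ m ∧ m ≤ n - 1 := by rw [hm]; split <;> omega
    split
    · right
      exact ⟨ach_m n (by omega) m hm, by omega⟩
    · rename_i hcm
      push Not at hcm
      split
      · rename_i hcond
        right
        refine ⟨?_, by omega⟩
        rcases hcond with hc | hc
        · rw [int_mod_two (k-1) (by omega)] at hc
          exact ach_even n (k-1) (by omega) hc (by omega)
        · right; exact ⟨by omega, hc⟩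
      · rename_i hcond
        push Not at hcond
        have hc1 := hcond.1
        rw [int_mod_two (k-1) (by omega)] at hc1
        by_cases h1 : k - 1 = 1
        · left; omega
        · right
          refine ⟨ach_even n (k-1-1) (by omega) (by omega) (by omega), by omega⟩

-- ===== VERDICT (by name: the statement is the Claim_ definition above) =====
theorem bitwiseAnd_spec : Claim_equal_bitwiseAnd := by
  intro n k _
  unfold Spec_bitwiseAnd
  rw [bitwiseAnd_eq_max]
  have hmax := PySem.List.le_foldl_max (pvVals n k) 0
  have hmem := PySem.List.foldl_max_mem (pvVals n k) 0
  set r := (pvVals n k).foldl max 0 with hr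
  have hub : r ≤ bitwiseAnd_alt n k := by
    rcases hmem with h0 | hin
    · rcases alt_mem n k with h | h
      · omega
      · have := ach_nonneg n _ h.1
        omega
    · rw [mem_vals_ach] at hin
      exact alt_ub n k r hin.2 hin.1
  have hlb : bitwiseAnd_alt n k ≤ r := by
    rcases alt_mem n k with h | h
    · have := hmax.1; omega
    · have hin : bitwiseAnd_alt n k ∈ pvVals n k := (mem_vals_ach n k _).2 ⟨h.2, h.1⟩
      exact hmax.2 _ hin
  omega
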